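-- pv_equiv track=rewrite | github.com/adityajoshi-0708/Multi-Object-Detection-and-Persistent-ID-Tracking-in-Public-Football | analytics/advanced_analytics.py | _estimate_id_switches
-- ===== SOURCE A (Python) =====
-- from collections import defaultdict
-- from typing import Dict, List, Tuple
--
-- def _estimate_id_switches(tracks: Dict) -> int:
--     """Estimate number of ID switches (simplified heuristic)"""
--     # Count gaps in player tracking (rough estimate)
--     player_frame_ids = defaultdict(list)
--
--     for frame_num, frame_players in enumerate(tracks['players']):
--         for player_id in frame_players.keys():
--             player_frame_ids[player_id].append(frame_num)
--
--     switches = 0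
--     for frames in player_frame_ids.values():
--         # Count gaps > 1 frame
--         frames = sorted(frames)
--         for i in range(len(frames) - 1):
--             if frames[i+1] - frames[i] > 1:
--                 switches += 1
--
--     return switches
-- ===== SOURCE B (Python) =====
-- def _estimate_id_switches(tracks):
--     """Estimate number of ID switches (simplified heuristic)"""
--     last_seen = {}
--     switches = 0
--     for frame_num, frame_players in enumerate(tracks['players']):
--         for player_id in frame_players.keys():
--             last = last_seen.get(player_id)
--             if last is not None and frame_num - last > 1:
--                 switches += 1
--             last_seen[player_id] = frame_num
--     return switches
-- ===== Notes on version B (the rewrite author's own statement) =====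
-- stated objective: simpler
-- what changed: Single pass keeping only each player's last-seen frame in a dict, instead of building per-player frame lists, sorting each, and scanning adjacent pairs in a second nested pass.
import Mathlib
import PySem

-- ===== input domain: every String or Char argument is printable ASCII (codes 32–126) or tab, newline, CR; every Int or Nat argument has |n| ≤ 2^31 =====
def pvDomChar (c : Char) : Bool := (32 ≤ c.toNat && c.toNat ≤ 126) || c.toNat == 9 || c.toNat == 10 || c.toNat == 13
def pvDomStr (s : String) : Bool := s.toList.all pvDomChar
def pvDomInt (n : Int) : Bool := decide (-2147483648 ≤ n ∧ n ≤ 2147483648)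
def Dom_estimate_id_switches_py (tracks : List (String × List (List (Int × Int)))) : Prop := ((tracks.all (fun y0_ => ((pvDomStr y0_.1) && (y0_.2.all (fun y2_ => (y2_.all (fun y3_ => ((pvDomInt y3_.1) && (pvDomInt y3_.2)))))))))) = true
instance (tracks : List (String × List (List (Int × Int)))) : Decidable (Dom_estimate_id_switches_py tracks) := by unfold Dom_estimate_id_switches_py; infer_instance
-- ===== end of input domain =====

-- B replaces A's two-pass scheme (build per-player frame lists, sort each, scan adjacent pairs)
-- by a single pass keeping only each player's last-seen frame in a dict; objective: simpler.


-- shared representation coercion: the keys of a Python dict arriving as an assoc list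
-- (first occurrences, in insertion order — exactly dict iteration order)
def pvKeys (f : List (Int × Int)) : List Int := PySem.List.dedup (f.map Prod.fst)

-- ===== PORT A =====
-- inner loop 'for i in range(len(frames)-1): if frames[i+1]-frames[i] > 1: switches += 1'
def pvGapLoop (fs : List Int) (s : Int) : Int :=
  (PySem.List.pyRange 0 ((fs.length : Int) - 1) 1).foldl
    (fun s i => if PySem.List.pyGetD fs (i + 1) 0 - PySem.List.pyGetD fs i 0 > 1 then s + 1 else s) s

def estimate_id_switches_py (tracks : List (String × List (List (Int × Int)))) : Int :=
  match (PySem.Dict.mk tracks).get? "players" with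
  | none => 0  -- Python raises KeyError here; excluded by Pre_
  | some frames =>
    let pfi : PySem.Dict Int (List Int) :=
      (PySem.List.enumerate frames 0).foldl
        (fun d p => (pvKeys p.2).foldl (fun d k => d.modify k [] (· ++ [p.1])) d)
        PySem.Dict.empty
    pfi.values.foldl (fun s fr => pvGapLoop (PySem.List.sorted fr (fun x => x) false) s) 0

-- ===== PORT B =====
def estimate_id_switches_py_alt (tracks : List (String × List (List (Int × Int)))) : Int :=
  match (PySem.Dict.mk tracks).get? "players" with
  | none => 0  -- Python raises KeyError here; excluded by Pre_
  | some frames =>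
    ((PySem.List.enumerate frames 0).foldl
      (fun (st : PySem.Dict Int Int × Int) p =>
        (pvKeys p.2).foldl
          (fun st k =>
            let s := match st.1.get? k with
              | some last => if p.1 - last > 1 then st.2 + 1 else st.2
              | none => st.2
            (st.1.insert k p.1, s))
          st)
      (PySem.Dict.empty, 0)).2

-- ===== PRECONDITION & SPEC =====
-- Pre_ excludes exactly the inputs where tracks has no 'players' key: Python A raises KeyError there.
def Pre_estimate_id_switches_py (tracks : List (String × List (List (Int × Int)))) : Prop :=
  "players" ∈ tracks.map Prod.fst
instance (tracks : List (String × List (List (Int × Int)))) : Decidable (Pre_estimate_id_switches_py tracks) := by unfold Pre_estimate_id_switches_py; infer_instance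
def pvWitness_estimate_id_switches_py : (List (String × List (List (Int × Int)))) :=
  [("players", [[(1, 0)], [], [(1, 0)]])]

def Spec_estimate_id_switches_py (tracks : List (String × List (List (Int × Int)))) (out : Int) : Prop := out = estimate_id_switches_py_alt tracks
instance (tracks : List (String × List (List (Int × Int)))) (out : Int) : Decidable (Spec_estimate_id_switches_py tracks out) := by unfold Spec_estimate_id_switches_py; infer_instance

-- ===== CLAIM (what is proved, stated in full; the proofs are below) =====
def Claim_equal_estimate_id_switches_py : Prop := ∀ (tracks : List (String × List (List (Int × Int)))), Dom_estimate_id_switches_py tracks → Pre_estimate_id_switches_py tracks → Spec_estimate_id_switches_py tracks (estimate_id_switches_py tracks)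

-- ===== LEMMAS AND PROOFS =====

-- number of adjacent gaps > 1 in a list (the quantity both programs accumulate)
def pvGap : List Int → Int
  | [] => 0
  | [_] => 0
  | a :: b :: t => (if b - a > 1 then 1 else 0) + pvGap (b :: t)

-- the gap contributed by appending frame n after history l
def pvDelta (l : List Int) (n : Int) : Int :=
  match l.getLast? with
  | some m => if n - m > 1 then 1 else 0
  | none => 0

-- occurrence frames of key k in the flattened (key, frame) pair list
def pvOcc (L : List (Int × Int)) (k : Int) : List Int :=
  (L.filter (fun q => q.1 == k)).map Prod.snd

-- the flattened step of B's loop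
def pvStepB (st : PySem.Dict Int Int × Int) (q : Int × Int) : PySem.Dict Int Int × Int :=
  let s := match st.1.get? q.1 with
    | some last => if q.2 - last > 1 then st.2 + 1 else st.2
    | none => st.2
  (st.1.insert q.1 q.2, s)

-- the flattened (player_id, frame_num) pair stream both loops traverse
def pvF (frames : List (List (Int × Int))) : List (Int × Int) :=
  (PySem.List.enumerate frames 0).flatMap (fun p => (pvKeys p.2).map (fun k => (k, p.1)))

theorem pvGap_append (l : List Int) (n : Int) : pvGap (l ++ [n]) = pvGap l + pvDelta l n := by
  induction l with
  | nil => simp [pvGap, pvDelta]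
  | cons a t ih =>
    cases t with
    | nil => simp [pvGap, pvDelta]
    | cons b t' =>
      simp only [List.cons_append, pvGap] at ih ⊢
      rw [ih]
      simp [pvDelta, List.getLast?_cons]
      ring

theorem pvGapLoop_eq (l : List Int) (s : Int) : pvGapLoop l s = s + pvGap l := by
  induction l using List.reverseRecOn generalizing s with
  | nil => simp [pvGapLoop, pvGap]
  | append_singleton l n ih =>
    rcases l with _ | ⟨a, t⟩
    · simp [pvGapLoop, pvGap]
    · set l := a :: t with hl
      have hlen : 1 ≤ l.length := by simp [hl]
      have hlen2 : ((l ++ [n]).length : Int) - 1 = ((l.length : Int) - 1) + 1 := by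
        simp
      rw [pvGapLoop, hlen2, PySem.List.pyRange_one_succ_right (by omega),
        List.foldl_append]
      have hpref :
          (PySem.List.pyRange 0 ((l.length : Int) - 1) 1).foldl
            (fun s i => if PySem.List.pyGetD (l ++ [n]) (i + 1) 0 - PySem.List.pyGetD (l ++ [n]) i 0 > 1 then s + 1 else s) s
          = (PySem.List.pyRange 0 ((l.length : Int) - 1) 1).foldl
            (fun s i => if PySem.List.pyGetD l (i + 1) 0 - PySem.List.pyGetD l i 0 > 1 then s + 1 else s) s := by
        apply List.foldl_ext
        intro s i hi
        have hib := (PySem.List.mem_pyRange_one).mp hi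
        have h1 : PySem.List.pyGetD (l ++ [n]) i 0 = PySem.List.pyGetD l i 0 := by
          rw [PySem.List.pyGetD_eq_getElem _ _ hib.1 (by simp; omega),
            PySem.List.pyGetD_eq_getElem _ _ hib.1 (by omega),
            List.getElem_append_left (by omega)]
        have h2 : PySem.List.pyGetD (l ++ [n]) (i + 1) 0 = PySem.List.pyGetD l (i + 1) 0 := by
          rw [PySem.List.pyGetD_eq_getElem _ _ (by omega) (by simp; omega),
            PySem.List.pyGetD_eq_getElem _ _ (by omega) (by omega),
            List.getElem_append_left (by omega)]
        rw [h1, h2]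
      have ihs := ih s
      unfold pvGapLoop at ihs
      rw [hpref, ihs, pvGap_append, List.foldl_cons, List.foldl_nil]
      have hlast : PySem.List.pyGetD (l ++ [n]) ((l.length : Int) - 1 + 1) 0 = n := by
        have h : ((l.length : Int) - 1 + 1) = (l.length : Int) := by omega
        rw [h, PySem.List.pyGetD_eq_getElem _ _ (by omega) (by simp)]
        simp
      have hpen : PySem.List.pyGetD (l ++ [n]) ((l.length : Int) - 1) 0 = l[l.length - 1] := by
        rw [PySem.List.pyGetD_eq_getElem _ _ (by omega) (by simp),
          List.getElem_append_left (by omega)]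
        congr 1; omega
      rw [hlast, hpen]
      have hdelta : pvDelta l n = if n - l[l.length - 1] > 1 then 1 else 0 := by
        rw [pvDelta, List.getLast?_eq_getElem?, List.getElem?_eq_getElem (by omega)]
      rw [hdelta]
      split <;> ring

-- dict component of B's flat fold is a plain insert fold
theorem pvB_dict (L : List (Int × Int)) (d : PySem.Dict Int Int) (s : Int) :
    (L.foldl pvStepB (d, s)).1 = L.foldl (fun d q => d.insert q.1 q.2) d := by
  induction L generalizing d s with
  | nil => rfl
  | cons q t ih => simpa [pvStepB] using ih _ _

theorem pvB_get (L : List (Int × Int)) (d : PySem.Dict Int Int) (k : Int) :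
    (L.foldl (fun d q => d.insert q.1 q.2) d).get? k = (pvOcc L k).getLast?.or (d.get? k) := by
  induction L generalizing d with
  | nil => simp [pvOcc]
  | cons q t ih =>
    by_cases hqk : q.1 = k
    · simp only [List.foldl_cons, ih, pvOcc, List.filter_cons, hqk, beq_self_eq_true]
      simp [List.getLast?_cons, PySem.Dict.get?_insert_self, ← hqk]
    · simp only [List.foldl_cons, ih, pvOcc, List.filter_cons]
      rw [PySem.Dict.get?_insert_of_ne _ _ (fun e => hqk e.symm)]
      simp [hqk]

theorem pvSum_update (S : List Int) (hS : S.Nodup) (k : Int) (hk : k ∈ S) (f f' : Int → Int)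
    (h : ∀ j ∈ S, j ≠ k → f' j = f j) :
    (S.map f').sum = (S.map f).sum + (f' k - f k) := by
  induction S with
  | nil => simp at hk
  | cons a t ih =>
    simp only [List.map_cons, List.sum_cons]
    rcases List.mem_cons.mp hk with rfl | hk'
    · have h' : ∀ j ∈ t, f' j = f j := fun j hj =>
        h j (List.mem_cons_of_mem _ hj) (fun e => (List.nodup_cons.mp hS).1 (e ▸ hj))
      rw [List.map_congr_left h']; ring
    · have ha : f' a = f a := h a (List.mem_cons_self) (fun e => (List.nodup_cons.mp hS).1 (e ▸ hk'))
      rw [ha, ih (List.nodup_cons.mp hS).2 hk' (fun j hj hjk => h j (List.mem_cons_of_mem _ hj) hjk)]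
      ring

theorem pvOcc_append (L : List (Int × Int)) (q : Int × Int) (j : Int) :
    pvOcc (L ++ [q]) j = pvOcc L j ++ (if q.1 = j then [q.2] else []) := by
  by_cases h : q.1 = j <;>
    simp [pvOcc, List.filter_append, h]

theorem pvOcc_nil_of_not_mem (L : List (Int × Int)) (k : Int) (h : k ∉ L.map Prod.fst) :
    pvOcc L k = [] := by
  simp only [pvOcc, List.map_eq_nil_iff, List.filter_eq_nil_iff]
  intro q hq hbeq
  exact h (List.mem_map.mpr ⟨q, hq, by simpa using hbeq⟩)

-- the main invariant: B's flat fold computes the sum of per-key gap counts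
theorem pvMain (L : List (Int × Int)) :
    (L.foldl pvStepB (PySem.Dict.empty, 0)).2
      = ((PySem.Set.ofList (L.map Prod.fst)).map (fun k => pvGap (pvOcc L k))).sum := by
  induction L using List.reverseRecOn with
  | nil => simp [PySem.Set.ofList]
  | append_singleton L q ih =>
    rw [List.foldl_append, List.foldl_cons, List.foldl_nil]
    have hst : (L.foldl pvStepB (PySem.Dict.empty, 0)).1.get? q.1
        = (pvOcc L q.1).getLast? := by
      rw [pvB_dict, pvB_get]; simp
    have hlhs : (pvStepB (L.foldl pvStepB (PySem.Dict.empty, 0)) q).2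
        = (L.foldl pvStepB (PySem.Dict.empty, 0)).2 + pvDelta (pvOcc L q.1) q.2 := by
      rw [pvStepB]
      simp only [hst]
      rw [pvDelta]
      cases h : (pvOcc L q.1).getLast? <;> (simp <;> split <;> ring)
    rw [hlhs, ih]
    have hmfst : (L ++ [q]).map Prod.fst = L.map Prod.fst ++ [q.1] := by simp
    rw [hmfst]
    have hset : PySem.Set.ofList (L.map Prod.fst ++ [q.1])
        = PySem.Set.add (PySem.Set.ofList (L.map Prod.fst)) q.1 := by
      rw [PySem.Set.ofList_eq_foldl, PySem.Set.ofList_eq_foldl, List.foldl_append]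
      rfl
    rw [hset]
    by_cases hmem : q.1 ∈ L.map Prod.fst
    · have hin : q.1 ∈ PySem.Set.ofList (L.map Prod.fst) := by
        rw [PySem.Set.mem_ofList]; exact hmem
      have hadd : PySem.Set.add (PySem.Set.ofList (L.map Prod.fst)) q.1
          = PySem.Set.ofList (L.map Prod.fst) := by
        simp [PySem.Set.add, PySem.Set.contains, hin]
      rw [hadd]
      rw [pvSum_update (PySem.Set.ofList (L.map Prod.fst)) (PySem.Set.nodup_ofList _) q.1 hin
        (fun k => pvGap (pvOcc L k)) (fun k => pvGap (pvOcc (L ++ [q]) k))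
        (fun j _ hj => by
          show pvGap (pvOcc (L ++ [q]) j) = pvGap (pvOcc L j)
          rw [pvOcc_append, if_neg (fun e : q.1 = j => hj e.symm), List.append_nil])]
      rw [pvOcc_append]; simp [pvGap_append]
    · have hnin : q.1 ∉ PySem.Set.ofList (L.map Prod.fst) := by
        rw [PySem.Set.mem_ofList]; exact hmem
      have hadd : PySem.Set.add (PySem.Set.ofList (L.map Prod.fst)) q.1
          = PySem.Set.ofList (L.map Prod.fst) ++ [q.1] := by
        simp [PySem.Set.add, PySem.Set.contains, hnin]
      rw [hadd, List.map_append, List.sum_append]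
      have h1 : (PySem.Set.ofList (L.map Prod.fst)).map (fun k => pvGap (pvOcc (L ++ [q]) k))
          = (PySem.Set.ofList (L.map Prod.fst)).map (fun k => pvGap (pvOcc L k)) := by
        apply List.map_congr_left
        intro j hj
        have hne : q.1 ≠ j := fun e => hnin (e ▸ hj)
        rw [pvOcc_append, if_neg hne, List.append_nil]
      rw [h1]
      have h2 : pvOcc (L ++ [q]) q.1 = [q.2] := by
        rw [pvOcc_append, pvOcc_nil_of_not_mem L q.1 hmem]; simp
      have h3 : pvDelta (pvOcc L q.1) q.2 = 0 := by
        rw [pvOcc_nil_of_not_mem L q.1 hmem]; rfl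
      simp [h2, h3, pvGap]

-- the pair stream is separated: equal keys appear with strictly increasing frame numbers
theorem pvF_sep (frames : List (List (Int × Int))) :
    (pvF frames).Pairwise (fun p q => p.1 = q.1 → p.2 < q.2) := by
  rw [pvF, List.pairwise_flatMap]
  constructor
  · intro p _
    rw [List.pairwise_map]
    exact (PySem.List.nodup_dedup _).imp (fun hne he => absurd he hne)
  · apply (PySem.List.pairwise_lt_enumerate frames 0).imp_of_mem
    intro p q _ _ hpq x hx y hy _
    obtain ⟨kx, _, rfl⟩ := List.mem_map.mp hx
    obtain ⟨ky, _, rfl⟩ := List.mem_map.mp hy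
    exact hpq

-- each key's occurrence list is strictly increasing
theorem pvOcc_pairwise (frames : List (List (Int × Int))) (k : Int) :
    (pvOcc (pvF frames) k).Pairwise (· < ·) := by
  rw [pvOcc, List.pairwise_map]
  apply ((pvF_sep frames).filter _).imp_of_mem
  intro p q hp hq h
  have hpk : p.1 = k := by simpa using (List.mem_filter.mp hp).2
  have hqk : q.1 = k := by simpa using (List.mem_filter.mp hq).2
  exact h (hpk.trans hqk.symm)

-- d.values through keys and getD (for a dict with distinct keys)
theorem pvValues (d : PySem.Dict Int (List Int)) (h : d.keys.Nodup) :
    d.values = d.keys.map (fun k => d.getD k []) := by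
  show d.items.map Prod.snd = (d.items.map Prod.fst).map (fun k => d.getD k [])
  rw [List.map_map]
  apply List.map_congr_left
  intro p hp
  obtain ⟨k, v⟩ := p
  exact (PySem.Dict.getD_of_mem_items d hp h []).symm

-- A's result on the frame list, reduced to the per-key gap-count sum over the flat stream
theorem pvA_eq (frames : List (List (Int × Int))) :
    ((PySem.List.enumerate frames 0).foldl
        (fun d p => (pvKeys p.2).foldl (fun d k => d.modify k [] (· ++ [p.1])) d)
        PySem.Dict.empty).values.foldl
      (fun s fr => pvGapLoop (PySem.List.sorted fr (fun x => x) false) s) 0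
    = ((PySem.Set.ofList ((pvF frames).map Prod.fst)).map
        (fun k => pvGap (pvOcc (pvF frames) k))).sum := by
  have hflat : (PySem.List.enumerate frames 0).foldl
      (fun d p => (pvKeys p.2).foldl (fun d k => d.modify k [] (· ++ [p.1])) d)
      PySem.Dict.empty
      = (pvF frames).foldl (fun d q => d.modify q.1 [] (· ++ [q.2])) PySem.Dict.empty := by
    rw [pvF, List.foldl_flatMap]
    apply List.foldl_ext
    intro d p _
    rw [List.foldl_map]
  rw [hflat]
  have hkeys : ((pvF frames).foldl (fun d q => d.modify q.1 [] (· ++ [q.2]))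
      PySem.Dict.empty).keys = PySem.Set.ofList ((pvF frames).map Prod.fst) := by
    rw [PySem.Dict.keys_foldl_modify_key (pvF frames) Prod.fst []
      (fun _ q => fun v => v ++ [q.2]) PySem.Dict.empty]
    simp [PySem.Set.update, PySem.Set.ofList_eq_foldl]
  have hnodup : ((pvF frames).foldl (fun d q => d.modify q.1 [] (· ++ [q.2]))
      PySem.Dict.empty).keys.Nodup := by
    apply PySem.Dict.nodup_keys_foldl_modify_key (pvF frames) Prod.fst []
      (fun _ q => fun v => v ++ [q.2]) PySem.Dict.empty
    simp
  have hgetD : ∀ k, ((pvF frames).foldl (fun d q => d.modify q.1 [] (· ++ [q.2]))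
      PySem.Dict.empty).getD k [] = pvOcc (pvF frames) k := by
    intro k
    rw [PySem.Dict.getD_foldl_modify_append]
    simp [pvOcc]
  rw [pvValues _ hnodup, hkeys, List.foldl_map]
  have hext : (PySem.Set.ofList ((pvF frames).map Prod.fst)).foldl
      (fun s k => pvGapLoop (PySem.List.sorted (((pvF frames).foldl
        (fun d q => d.modify q.1 [] (· ++ [q.2])) PySem.Dict.empty).getD k [])
        (fun x => x) false) s) 0
      = (PySem.Set.ofList ((pvF frames).map Prod.fst)).foldl
        (fun s k => s + pvGap (pvOcc (pvF frames) k)) 0 := by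
    apply List.foldl_ext
    intro s k _
    rw [hgetD k, PySem.List.sorted_eq_of_perm_of_pairwise_lt _ _ (fun x => x)
      (List.Perm.refl _) (pvOcc_pairwise frames k), pvGapLoop_eq]
  rw [hext, PySem.List.foldl_add, zero_add]

-- B's result on the frame list is the flat fold
theorem pvB_eq (frames : List (List (Int × Int))) :
    ((PySem.List.enumerate frames 0).foldl
      (fun (st : PySem.Dict Int Int × Int) p =>
        (pvKeys p.2).foldl
          (fun st k =>
            let s := match st.1.get? k with
              | some last => if p.1 - last > 1 then st.2 + 1 else st.2
              | none => st.2
            (st.1.insert k p.1, s))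
          st)
      (PySem.Dict.empty, 0))
    = (pvF frames).foldl pvStepB (PySem.Dict.empty, 0) := by
  rw [pvF, List.foldl_flatMap]
  apply List.foldl_ext
  intro st p _
  rw [List.foldl_map]
  rfl

-- ===== VERDICT (by name: the statement is the Claim_ definition above) =====
theorem estimate_id_switches_py_spec : Claim_equal_estimate_id_switches_py := by
  intro tracks _ _
  unfold Spec_estimate_id_switches_py estimate_id_switches_py estimate_id_switches_py_alt
  cases h : (PySem.Dict.mk tracks).get? "players" with
  | none => rfl
  | some frames =>
    simp only []
    rw [pvA_eq, pvB_eq, pvMain]
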